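-- pv_equiv track=rewrite | github.com/anderson895/Chess_Engine_Arena | chess960.py | _castling_field
-- ===== SOURCE A (Python) =====
-- def _castling_field(back: list[str]) -> str:
--     """
--     Return X-FEN castling string for the given back rank.
--     White castling rights use uppercase file letters (A-H),
--     black use lowercase.
--     """
--     king_col  = back.index('k')
--     rook_cols = [i for i, p in enumerate(back) if p == 'r']
--
--     # Kingside rook = the rook to the RIGHT of the king
--     ks_col = next((c for c in rook_cols if c > king_col), None)
--     # Queenside rook = the rook to the LEFT of the king
--     qs_col = next((c for c in reversed(rook_cols) if c < king_col), None)
--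
--     field = ''
--     if ks_col is not None:
--         field += chr(ord('A') + ks_col)   # e.g. 'H' for standard
--     if qs_col is not None:
--         field += chr(ord('A') + qs_col)   # e.g. 'A' for standard
--     # Black mirrors white
--     field += field.lower()
--     return field if field else '-'
-- ===== SOURCE B (Python) =====
-- def _castling_field(back: list[str]) -> str:
--     """X-FEN castling string via a single left-to-right pass with a small
--     state machine (king seen?, nearest rook left of king, first rook right
--     of king); no rook-column list and no directional re-scans."""
--     king = qs = ks = None
--     for i, p in enumerate(back):
--         if king is None:
--             if p == 'k':
--                 king = i
--             elif p == 'r':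
--                 qs = i          # keeps being overwritten: ends as nearest rook left of king
--         elif ks is None and p == 'r':
--             ks = i              # first rook after the king
--     if king is None:
--         raise ValueError("'k' is not in list")
--     field = ''.join(chr(ord('A') + c) for c in (ks, qs) if c is not None)
--     return (field + field.lower()) or '-'
-- ===== Notes on version B (the rewrite author's own statement) =====
-- stated objective: alternative
-- what changed: B replaces A's staged pipeline (build the full rook-column list, then filter it forward for the kingside rook and reversed for the queenside rook) with one left-to-right pass driven by a three-field state machine that records the king, the most recent rook before the king, and the first rook after it.
import Mathlib
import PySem

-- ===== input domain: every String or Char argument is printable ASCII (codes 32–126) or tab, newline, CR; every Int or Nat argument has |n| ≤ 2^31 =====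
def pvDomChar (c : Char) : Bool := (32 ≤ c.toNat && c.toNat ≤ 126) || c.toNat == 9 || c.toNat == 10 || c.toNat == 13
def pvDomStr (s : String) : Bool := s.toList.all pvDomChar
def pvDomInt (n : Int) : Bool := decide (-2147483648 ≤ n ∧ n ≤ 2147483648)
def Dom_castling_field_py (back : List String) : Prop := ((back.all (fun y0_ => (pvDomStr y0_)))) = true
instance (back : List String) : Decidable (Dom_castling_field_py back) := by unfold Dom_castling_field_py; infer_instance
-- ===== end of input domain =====

-- B replaces A's staged pipeline (rook list built, then filtered forward and reversed) by one left-to-right pass with a three-field state machine; alternative decomposition, same cost.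


-- ===== PORT A =====
def castling_field_py (back : List String) : String :=
  match PySem.List.index? back "k" with
  | none => ""   -- back.index('k') raises ValueError: excluded by Pre_
  | some kc =>
    let rook_cols : List Int :=
      ((PySem.List.enumerate back).filter (fun ip => ip.2 == "r")).map (fun ip => ip.1)
    let ks : Option Int := rook_cols.find? (fun c => decide ((kc : Int) < c))
    let qs : Option Int := rook_cols.reverse.find? (fun c => decide (c < (kc : Int)))
    let field : String :=
      (match ks with | some c => String.ofList [Char.ofNat (65 + c.toNat)] | none => "")
    let field : String :=
      field ++ (match qs with | some c => String.ofList [Char.ofNat (65 + c.toNat)] | none => "")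
    let field : String := field ++ PySem.Str.lower field
    if field == "" then "-" else field

-- ===== PORT B =====
-- loop body of B's single pass: state = (king, qs, ks)
def pvStep (s : Option Int × Option Int × Option Int) (ip : Int × String) :
    Option Int × Option Int × Option Int :=
  match s with
  | (none, qs, ks) =>
      if ip.2 == "k" then (some ip.1, qs, ks)
      else if ip.2 == "r" then (none, some ip.1, ks)
      else (none, qs, ks)
  | (some k, qs, none) =>
      if ip.2 == "r" then (some k, qs, some ip.1) else (some k, qs, none)
  | (some k, qs, some x) => (some k, qs, some x)

def castling_field_py_alt (back : List String) : String :=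
  match (PySem.List.enumerate back).foldl pvStep (none, none, none) with
  | (none, _, _) => ""   -- raise ValueError: excluded by Pre_
  | (some _, qs, ks) =>
    let field : String :=
      String.ofList ((([ks, qs].filterMap id)).map (fun c => Char.ofNat (65 + c.toNat)))
    let r := field ++ PySem.Str.lower field
    if r == "" then "-" else r

-- ===== PRECONDITION & SPEC =====
-- Pre_ excludes exactly the inputs on which back.index('k') raises ValueError (no 'k' on the rank); B raises there too.
def Pre_castling_field_py (back : List String) : Prop := "k" ∈ back
instance (back : List String) : Decidable (Pre_castling_field_py back) := by unfold Pre_castling_field_py; infer_instance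
def pvWitness_castling_field_py : List String := ["r", "n", "k", "r"]
def Spec_castling_field_py (back : List String) (out : String) : Prop := out = castling_field_py_alt back
instance (back : List String) (out : String) : Decidable (Spec_castling_field_py back out) := by unfold Spec_castling_field_py; infer_instance

-- ===== CLAIM (what is proved, stated in full; the proofs are below) =====
def Claim_equal_castling_field_py : Prop := ∀ (back : List String), Dom_castling_field_py back → Pre_castling_field_py back → Spec_castling_field_py back (castling_field_py back)

-- ===== LEMMAS AND PROOFS =====

lemma getLast?_cons' {α : Type} (a : α) (l : List α) :
    (a :: l).getLast? = l.getLast?.or (some a) := by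
  cases l with
  | nil => rfl
  | cons b t =>
    rw [List.getLast?_cons_cons]
    cases h : (b :: t).getLast? with
    | some v => rfl
    | none => exact absurd h (by simp)

-- last kept element = first match scanning from the right
lemma filter_getLast?_eq_find?_reverse {α : Type} (p : α → Bool) (l : List α) :
    (l.filter p).getLast? = l.reverse.find? p := by
  induction l with
  | nil => rfl
  | cons a t ih =>
    rw [List.reverse_cons, List.find?_append, ← ih, List.filter_cons]
    cases h : p a with
    | true => simp [getLast?_cons', h]
    | false => simp [h]

-- once ks is set, the state never changes
lemma fold_stuck (l : List (Int × String)) (k x : Int) (qs : Option Int) :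
    l.foldl pvStep (some k, qs, some x) = (some k, qs, some x) := by
  induction l with
  | nil => rfl
  | cons a t ih => simpa [pvStep] using ih

-- after the king: ks becomes the first rook of the remainder
lemma fold_after (l : List (Int × String)) (k : Int) (qs : Option Int) :
    l.foldl pvStep (some k, qs, none)
      = (some k, qs, (l.find? (fun ip => ip.2 == "r")).map Prod.fst) := by
  induction l with
  | nil => rfl
  | cons a t ih =>
    rw [List.foldl_cons, List.find?_cons]
    cases h : (a.2 == "r") with
    | true => simp only [pvStep, h, if_true]; rw [fold_stuck]; rfl
    | false => simpa [pvStep, h] using ih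

-- before the king: qs tracks the last rook seen so far
lemma fold_before (l : List (Int × String)) (qs ks : Option Int)
    (h : ∀ x ∈ l, (x.2 == "k") = false) :
    l.foldl pvStep (none, qs, ks)
      = (none, (((l.filter (fun ip => ip.2 == "r")).map Prod.fst).getLast?).or qs, ks) := by
  induction l generalizing qs with
  | nil => rfl
  | cons a t ih =>
    have hk := h a (by simp)
    rw [List.foldl_cons, List.filter_cons]
    cases hr : (a.2 == "r") with
    | true =>
      simp only [pvStep, hk, hr, Bool.false_eq_true, if_false, if_true]
      rw [ih (some a.1) (fun x hx => h x (by simp [hx]))]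
      simp only [List.map_cons, getLast?_cons']
      cases ((t.filter (fun ip => ip.2 == "r")).map Prod.fst).getLast? <;> simp
    | false =>
      simp only [pvStep, hk, hr, Bool.false_eq_true, if_false]
      rw [ih qs (fun x hx => h x (by simp [hx]))]

-- B's fold, characterised by range scans around the king column
lemma fold_eq (back : List String) (kc : Nat)
    (h : PySem.List.index? back "k" = some kc) :
    (PySem.List.enumerate back).foldl pvStep (none, none, none)
      = (some (kc : Int),
         ((PySem.List.pyRange 0 (kc : Int) 1).filter
             (fun i => PySem.List.pyGetD back i "" == "r")).getLast?,
         (PySem.List.pyRange ((kc : Int) + 1) (back.length : Int) 1).find?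
             (fun i => PySem.List.pyGetD back i "" == "r")) := by
  obtain ⟨hkc, hget, hlt⟩ := PySem.List.getElem_of_index?_eq_some h
  rw [PySem.List.enumerate_eq_map_pyRange (d := "")]
  rw [PySem.List.len_eq]
  rw [PySem.List.pyRange_one_append 0 (kc : Int) (back.length : Int) (by omega) (by omega)]
  rw [PySem.List.pyRange_one_cons (show (kc : Int) < (back.length : Int) by exact_mod_cast hkc)]
  rw [List.map_append, List.map_cons, List.foldl_append, List.foldl_cons]
  rw [fold_before _ none none (fun x hx => by
    simp only [List.mem_map] at hx
    obtain ⟨i, hi, rfl⟩ := hx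
    rw [PySem.List.mem_pyRange_one] at hi
    have h0 : (0 : Int) ≤ i := hi.1
    obtain ⟨j, rfl⟩ := Int.eq_ofNat_of_zero_le h0
    have hjk : j < kc := by exact_mod_cast hi.2
    simp only [PySem.List.pyGetD_natCast]
    rw [List.getD_eq_getElem _ _ (by omega)]
    exact beq_false_of_ne (hlt j hjk))]
  have hgk : PySem.List.pyGetD back (kc : Int) "" = "k" := by
    simp only [PySem.List.pyGetD_natCast]
    rw [List.getD_eq_getElem _ _ hkc]; exact hget
  rw [hgk]
  rw [show ∀ q : Option Int, pvStep (none, q, none) ((kc : Int), "k") = (some (kc : Int), q, none)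
        from fun q => by simp [pvStep]]
  rw [fold_after]
  simp only [List.find?_map, List.filter_map, List.map_map, Option.map_map, Option.or_none]
  simp [Function.comp_def]

-- find? through a conjunct (the shape List.find?_filter leaves) that is true on every element
lemma find?_and_true {α : Type} (p q : α → Bool) (l : List α)
    (h : ∀ x ∈ l, q x = true) :
    l.find? (fun a => decide (p a = true ∧ q a = true)) = l.find? p := by
  have e : (fun a => decide (p a = true ∧ q a = true)) = (fun a => p a && q a) := by
    funext x; cases p x <;> cases q x <;> simp
  rw [e]
  induction l with
  | nil => rfl
  | cons a t ih =>
    have hq := h a (by simp)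
    simp only [List.find?_cons, hq, Bool.and_true]
    cases hp : p a <;> simp [ih (fun x hx => h x (by simp [hx]))]

lemma find?_and_none {α : Type} (p q : α → Bool) (l : List α)
    (h : ∀ x ∈ l, q x = false) :
    l.find? (fun a => decide (p a = true ∧ q a = true)) = none :=
  List.find?_eq_none.mpr (fun x hx => by simp [h x hx])

-- A's rook-column list is the filtered index range
lemma rook_cols_eq (back : List String) :
    ((PySem.List.enumerate back).filter (fun ip => ip.2 == "r")).map (fun ip => ip.1)
      = (PySem.List.pyRange 0 (back.length : Int) 1).filter
          (fun i => PySem.List.pyGetD back i "" == "r") := by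
  rw [PySem.List.enumerate_eq_map_pyRange (d := "")]
  rw [List.filter_map, List.map_map]
  simp [Function.comp_def, PySem.List.len_eq]

lemma ks_eq (back : List String) (kc : Nat) (hkc : kc < back.length) :
    (((PySem.List.enumerate back).filter (fun ip => ip.2 == "r")).map (fun ip => ip.1)).find?
        (fun c => decide ((kc : Int) < c))
      = (PySem.List.pyRange ((kc : Int) + 1) (back.length : Int) 1).find?
          (fun i => PySem.List.pyGetD back i "" == "r") := by
  rw [rook_cols_eq, List.find?_filter]
  rw [PySem.List.pyRange_one_append 0 ((kc : Int) + 1) (back.length : Int)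
        (by omega) (by omega)]
  rw [List.find?_append]
  rw [find?_and_none _ (fun c => decide ((kc : Int) < c)) _ (fun x hx => by
    rw [PySem.List.mem_pyRange_one] at hx
    simp; omega)]
  rw [find?_and_true _ (fun c => decide ((kc : Int) < c)) _ (fun x hx => by
    rw [PySem.List.mem_pyRange_one] at hx
    simp; omega)]
  simp

lemma qs_eq (back : List String) (kc : Nat) (hkc : kc < back.length) :
    ((((PySem.List.enumerate back).filter (fun ip => ip.2 == "r")).map (fun ip => ip.1)).reverse).find?
        (fun c => decide (c < (kc : Int)))
      = ((PySem.List.pyRange 0 (kc : Int) 1).filter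
          (fun i => PySem.List.pyGetD back i "" == "r")).getLast? := by
  rw [rook_cols_eq, ← List.filter_reverse, List.find?_filter]
  rw [PySem.List.pyRange_one_append 0 (kc : Int) (back.length : Int)
        (by omega) (by omega)]
  rw [List.reverse_append, List.find?_append]
  rw [find?_and_none _ (fun c => decide (c < (kc : Int))) _ (fun x hx => by
    rw [List.mem_reverse, PySem.List.mem_pyRange_one] at hx
    simp; omega)]
  rw [find?_and_true _ (fun c => decide (c < (kc : Int))) _ (fun x hx => by
    rw [List.mem_reverse, PySem.List.mem_pyRange_one] at hx
    simp; omega)]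
  rw [filter_getLast?_eq_find?_reverse]
  simp

-- A's two-append field build equals B's join build, for any option pair
lemma build_eq (o1 o2 : Option Int) :
    ((match o1 with | some c => String.ofList [Char.ofNat (65 + c.toNat)] | none => "") ++
     (match o2 with | some c => String.ofList [Char.ofNat (65 + c.toNat)] | none => ""))
      = String.ofList ((([o1, o2].filterMap id)).map (fun c => Char.ofNat (65 + c.toNat))) := by
  have e : ("" : String) = String.ofList [] := rfl
  cases o1 <;> cases o2
  · rfl
  · rw [e, ← String.ofList_append]; rfl
  · rw [e, ← String.ofList_append]; rfl
  · rw [← String.ofList_append]; rfl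

-- ===== VERDICT (by name: the statement is the Claim_ definition above) =====
theorem castling_field_py_spec : Claim_equal_castling_field_py := by
  intro back _ hpre
  unfold Spec_castling_field_py castling_field_py castling_field_py_alt
  cases h : PySem.List.index? back "k" with
  | none =>
    exact absurd hpre ((PySem.List.index?_eq_none_iff _ _).mp h)
  | some kc =>
    obtain ⟨hkc, -, -⟩ := PySem.List.getElem_of_index?_eq_some h
    rw [fold_eq back kc h]
    dsimp only
    rw [ks_eq back kc hkc, qs_eq back kc hkc, build_eq]
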